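-- pv_equiv track=rewrite | github.com/nath-haran/TaSM | apriorimain.py | create_candidates
-- ===== SOURCE A (Python) =====
-- def create_candidates(dataset, verbose=False):
--
--     c1 = [] # list of all items in the database of transactions
--     for transaction in dataset:
--         for item in transaction:
--             if not [item] in c1:
--                 c1.append([item])
--     c1.sort()
--
--     return map(frozenset, c1)
-- ===== SOURCE B (Python) =====
-- def create_candidates(dataset, verbose=False):
--     # Flatten all transactions, sort once, then drop adjacent duplicates in a
--     # single pass (sort-first dedup instead of A's per-item membership scan).
--     items = []
--     for transaction in dataset:
--         items.extend(transaction)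
--     items.sort()
--     c1 = []
--     for x in items:
--         if not c1 or c1[-1] != [x]:
--             c1.append([x])
--     return map(frozenset, c1)
-- ===== Notes on version B (the rewrite author's own statement) =====
-- stated objective: faster
-- what changed: Replaces A's quadratic build (linear membership scan of the candidate list for every item) by flatten + one sort + a single linear pass dropping adjacent duplicates.
import Mathlib
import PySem

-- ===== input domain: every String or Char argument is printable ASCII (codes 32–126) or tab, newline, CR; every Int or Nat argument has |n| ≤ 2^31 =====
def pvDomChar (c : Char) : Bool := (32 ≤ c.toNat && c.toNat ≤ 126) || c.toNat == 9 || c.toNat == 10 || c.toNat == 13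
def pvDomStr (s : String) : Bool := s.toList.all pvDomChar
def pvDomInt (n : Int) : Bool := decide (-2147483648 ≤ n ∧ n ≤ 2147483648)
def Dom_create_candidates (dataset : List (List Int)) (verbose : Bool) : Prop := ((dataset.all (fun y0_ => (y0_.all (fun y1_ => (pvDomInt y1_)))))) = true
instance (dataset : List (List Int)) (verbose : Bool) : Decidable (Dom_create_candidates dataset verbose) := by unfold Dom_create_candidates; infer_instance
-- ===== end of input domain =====

-- B flattens, sorts once and drops adjacent duplicates in one pass, instead of A's
-- per-item linear membership scan of the growing candidate list (faster).


-- ===== PORT A =====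
-- map(frozenset, c1) yields singleton frozensets; a frozenset is a List Int of
-- distinct elements, so each [item] is returned as the singleton list [item].
def create_candidates (dataset : List (List Int)) (verbose : Bool) : List (List Int) :=
  let c1 : List (List Int) :=
    dataset.foldl (fun c1 transaction =>
      transaction.foldl (fun c1 item =>
        if ¬ ([item] ∈ c1) then c1 ++ [[item]] else c1) c1) []
  PySem.List.sorted c1 (fun x => x) false

-- ===== PORT B =====
def create_candidates_alt (dataset : List (List Int)) (verbose : Bool) : List (List Int) :=
  let items : List Int := dataset.foldl (fun acc transaction => acc ++ transaction) []
  let sortedItems := PySem.List.sorted items (fun x => x) false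
  sortedItems.foldl (fun c1 x =>
    if c1 = [] ∨ c1.getLast? ≠ some [x] then c1 ++ [[x]] else c1) []

-- ===== PRECONDITION & SPEC =====
def Spec_create_candidates (dataset : List (List Int)) (verbose : Bool) (out : List (List Int)) : Prop := out = create_candidates_alt dataset verbose
instance (dataset : List (List Int)) (verbose : Bool) (out : List (List Int)) : Decidable (Spec_create_candidates dataset verbose out) := by unfold Spec_create_candidates; infer_instance

-- ===== CLAIM (what is proved, stated in full; the proofs are below) =====
def Claim_equal_create_candidates : Prop := ∀ (dataset : List (List Int)) (verbose : Bool), Dom_create_candidates dataset verbose → Spec_create_candidates dataset verbose (create_candidates dataset verbose)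

-- ===== LEMMAS AND PROOFS =====

/-- The singleton embedding `a ↦ [a]`. -/
def pvSg (a : Int) : List Int := [a]

/-- Adjacent dedup continuing after a last kept element `l`. -/
def pvDedupFrom : Int → List Int → List Int
  | _, [] => []
  | l, x :: xs => if x = l then pvDedupFrom l xs else x :: pvDedupFrom x xs

/-- Adjacent dedup of a whole list. -/
def pvDedupAll : List Int → List Int
  | [] => []
  | x :: xs => x :: pvDedupFrom x xs

theorem pvSg_lt {a b : Int} (h : a < b) : pvSg a < pvSg b :=
  List.cons_lt_cons_iff.mpr (Or.inl h)

theorem nested_foldl (g : List (List Int) → Int → List (List Int)) :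
    ∀ (ds : List (List Int)) (c0 : List (List Int)),
      ds.foldl (fun c t => t.foldl g c) c0 = (ds.flatMap id).foldl g c0 := by
  intro ds
  induction ds with
  | nil => intro c0; simp
  | cons t ds ih => intro c0; simp [List.foldl_append, ih]

theorem A_loop : ∀ (flat : List Int) (u : List Int),
    flat.foldl (fun c x => if ¬ ([x] ∈ c) then c ++ [[x]] else c) (u.map pvSg)
      = (flat.foldl PySem.Set.add u).map pvSg := by
  intro flat
  induction flat with
  | nil => intro u; simp
  | cons x xs ih =>
    intro u
    have hmem : ([x] ∈ u.map pvSg) ↔ x ∈ u := by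
      constructor
      · intro h
        rcases List.mem_map.mp h with ⟨a, ha, he⟩
        cases he; simpa [pvSg] using ha
      · intro h; exact List.mem_map.mpr ⟨x, h, rfl⟩
    by_cases hx : x ∈ u
    · simp only [List.foldl_cons]
      rw [if_neg (by simpa [hmem] using hx)]
      rw [PySem.Set.add_of_mem hx]
      exact ih u
    · simp only [List.foldl_cons]
      rw [if_pos (by simpa [hmem] using hx)]
      rw [PySem.Set.add_of_not_mem hx]
      have : u.map pvSg ++ [[x]] = (u ++ [x]).map pvSg := by simp [pvSg]
      rw [this]
      exact ih (u ++ [x])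

theorem B_loop_aux : ∀ (ys : List Int) (zs : List Int) (l : Int),
    ys.foldl (fun c1 x => if c1 = [] ∨ c1.getLast? ≠ some [x] then c1 ++ [[x]] else c1)
        ((zs ++ [l]).map pvSg)
      = ((zs ++ [l]) ++ pvDedupFrom l ys).map pvSg := by
  intro ys
  induction ys with
  | nil => intro zs l; simp [pvDedupFrom]
  | cons x t ih =>
    intro zs l
    have hne : (zs ++ [l]).map pvSg ≠ [] := by simp
    have hlast : ((zs ++ [l]).map pvSg).getLast? = some [l] := by
      simp [pvSg]
    by_cases hxl : x = l
    · subst hxl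
      simp only [List.foldl_cons]
      rw [if_neg (by rw [hlast]; simp [pvSg])]
      rw [pvDedupFrom, if_pos rfl]
      exact ih zs x
    · simp only [List.foldl_cons]
      rw [if_pos (by right; rw [hlast]; simp; omega)]
      have hstep : (zs ++ [l]).map pvSg ++ [[x]] = ((zs ++ [l]) ++ [x]).map pvSg := by
        simp [pvSg]
      rw [hstep, ih (zs ++ [l]) x]
      rw [pvDedupFrom, if_neg hxl]
      simp

theorem B_loop (ys : List Int) :
    ys.foldl (fun c1 x => if c1 = [] ∨ c1.getLast? ≠ some [x] then c1 ++ [[x]] else c1) []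
      = (pvDedupAll ys).map pvSg := by
  cases ys with
  | nil => simp [pvDedupAll]
  | cons x t =>
    rw [List.foldl_cons, if_pos (Or.inl rfl)]
    have h0 : (([] : List (List Int)) ++ [[x]]) = (([] ++ [x]).map pvSg) := by simp [pvSg]
    rw [h0, B_loop_aux t [] x]
    simp [pvDedupAll, pvSg]

theorem mem_pvDedupFrom_sub : ∀ (ys : List Int) (l z : Int), z ∈ pvDedupFrom l ys → z ∈ ys := by
  intro ys
  induction ys with
  | nil => intro l z h; simp [pvDedupFrom] at h
  | cons x t ih =>
    intro l z h
    rw [pvDedupFrom] at h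
    split at h
    · exact List.mem_cons_of_mem _ (ih l z h)
    · rcases List.mem_cons.mp h with h | h
      · exact h ▸ List.mem_cons_self
      · exact List.mem_cons_of_mem _ (ih x z h)

theorem mem_pvDedupFrom_or : ∀ (ys : List Int) (l z : Int), z ∈ ys → z ∈ pvDedupFrom l ys ∨ z = l := by
  intro ys
  induction ys with
  | nil => intro l z h; simp at h
  | cons x t ih =>
    intro l z h
    rw [pvDedupFrom]
    by_cases hxl : x = l
    · rw [if_pos hxl]
      rcases List.mem_cons.mp h with h | h
      · right; omega
      · exact ih l z h
    · rw [if_neg hxl]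
      rcases List.mem_cons.mp h with h | h
      · left; exact h ▸ List.mem_cons_self
      · rcases ih x z h with h' | h'
        · left; exact List.mem_cons_of_mem _ h'
        · left; exact h' ▸ List.mem_cons_self

theorem pvDedupFrom_strict : ∀ (ys : List Int) (l : Int),
    ys.Pairwise (· ≤ ·) → (∀ y ∈ ys, l ≤ y) →
      (∀ z ∈ pvDedupFrom l ys, l < z) ∧ (pvDedupFrom l ys).Pairwise (· < ·) := by
  intro ys
  induction ys with
  | nil => intro l _ _; simp [pvDedupFrom]
  | cons x t ih =>
    intro l hp hall
    rcases List.pairwise_cons.mp hp with ⟨hx, ht⟩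
    rw [pvDedupFrom]
    by_cases hxl : x = l
    · rw [if_pos hxl]
      exact ih l ht (fun y hy => hall y (List.mem_cons_of_mem _ hy))
    · rw [if_neg hxl]
      have hlx : l < x := lt_of_le_of_ne (hall x List.mem_cons_self) (Ne.symm hxl)
      rcases ih x ht hx with ⟨hgt, hpw⟩
      refine ⟨?_, ?_⟩
      · intro z hz
        rcases List.mem_cons.mp hz with hz | hz
        · exact hz ▸ hlx
        · exact lt_trans hlx (hgt z hz)
      · exact List.pairwise_cons.mpr ⟨hgt, hpw⟩

theorem mem_pvDedupAll (ys : List Int) (z : Int) : z ∈ pvDedupAll ys ↔ z ∈ ys := by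
  cases ys with
  | nil => simp [pvDedupAll]
  | cons x t =>
    rw [pvDedupAll]
    constructor
    · intro h
      rcases List.mem_cons.mp h with h | h
      · exact h ▸ List.mem_cons_self
      · exact List.mem_cons_of_mem _ (mem_pvDedupFrom_sub t x z h)
    · intro h
      rcases List.mem_cons.mp h with h | h
      · exact h ▸ List.mem_cons_self
      · rcases mem_pvDedupFrom_or t x z h with h' | h'
        · exact List.mem_cons_of_mem _ h'
        · exact h' ▸ List.mem_cons_self

theorem pvDedupAll_pairwise (ys : List Int) (h : ys.Pairwise (· ≤ ·)) :
    (pvDedupAll ys).Pairwise (· < ·) := by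
  cases ys with
  | nil => simp [pvDedupAll]
  | cons x t =>
    rw [pvDedupAll]
    rcases List.pairwise_cons.mp h with ⟨hx, ht⟩
    rcases pvDedupFrom_strict t x ht hx with ⟨hgt, hpw⟩
    exact List.pairwise_cons.mpr ⟨hgt, hpw⟩

theorem pvSorted_irrel (xs : List (List Int)) :
    @PySem.List.sorted (List Int) (List Int) List.instLT List.decidableLT xs (fun x => x) false
      = @PySem.List.sorted (List Int) (List Int) List.instLinearOrder.toLT List.instLinearOrder.toDecidableLT xs (fun x => x) false := by
  congr 1

theorem main_eq (dataset : List (List Int)) (verbose : Bool) :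
    create_candidates dataset verbose = create_candidates_alt dataset verbose := by
  have hflat : dataset.foldl (fun acc t => acc ++ t) [] = dataset.flatMap id := by
    simpa using PySem.List.foldl_append_eq_flatMap (fun t => t) dataset ([] : List Int)
  have hA : create_candidates dataset verbose
      = PySem.List.sorted ((PySem.Set.ofList (dataset.flatMap id)).map pvSg) (fun x => x) false := by
    show PySem.List.sorted
        (dataset.foldl (fun c1 transaction =>
          transaction.foldl (fun c1 item =>
            if ¬ ([item] ∈ c1) then c1 ++ [[item]] else c1) c1) []) (fun x => x) false = _
    rw [nested_foldl]
    have h2 := A_loop (dataset.flatMap id) []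
    simp only [List.map_nil] at h2
    rw [h2, PySem.Set.ofList_eq_foldl]
  have hB : create_candidates_alt dataset verbose
      = (pvDedupAll (PySem.List.sorted (dataset.flatMap id) (fun x => x) false)).map pvSg := by
    show (PySem.List.sorted (dataset.foldl (fun acc transaction => acc ++ transaction) []) (fun x => x) false).foldl
        (fun c1 x => if c1 = [] ∨ c1.getLast? ≠ some [x] then c1 ++ [[x]] else c1) [] = _
    rw [hflat, B_loop]
  have hSle : (PySem.List.sorted (dataset.flatMap id) (fun x => x) false).Pairwise (· ≤ ·) :=
    PySem.List.sorted_pairwise (dataset.flatMap id) (fun x => x)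
  have hDlt : (pvDedupAll (PySem.List.sorted (dataset.flatMap id) (fun x => x) false)).Pairwise (· < ·) :=
    pvDedupAll_pairwise _ hSle
  have hDnd : (pvDedupAll (PySem.List.sorted (dataset.flatMap id) (fun x => x) false)).Nodup :=
    hDlt.imp (fun h => ne_of_lt h)
  have hperm : ((pvDedupAll (PySem.List.sorted (dataset.flatMap id) (fun x => x) false)).map pvSg).Perm
      ((PySem.Set.ofList (dataset.flatMap id)).map pvSg) := by
    refine List.Perm.map pvSg ?_
    refine (List.perm_ext_iff_of_nodup hDnd (PySem.Set.nodup_ofList _)).mpr ?_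
    intro a
    rw [mem_pvDedupAll, PySem.List.mem_sorted, PySem.Set.mem_ofList]
  have hpw : ((pvDedupAll (PySem.List.sorted (dataset.flatMap id) (fun x => x) false)).map pvSg).Pairwise
      (fun a b => a < b) :=
    List.pairwise_map.mpr (hDlt.imp (fun h => pvSg_lt h))
  rw [hA, hB, pvSorted_irrel]
  exact PySem.List.sorted_eq_of_perm_of_pairwise_lt _ _ (fun x => x) hperm hpw

-- ===== VERDICT (by name: the statement is the Claim_ definition above) =====
theorem create_candidates_spec : Claim_equal_create_candidates := by
  intro dataset verbose _
  exact main_eq dataset verbose
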